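-- pv_equiv track=rewrite | github.com/mthooyavan/diff-fox | src/diff_fox/context/symbols.py | _symbol_overlaps_changes
-- ===== SOURCE A (Python) =====
-- def _symbol_overlaps_changes(
--     start_line: int,
--     end_line: int,
--     changed_lines: set[int],
-- ) -> bool:
--     """Check if a symbol's line range overlaps with changed lines.
--
--     Args:
--         start_line: 1-based start of the symbol.
--         end_line: 1-based end of the symbol.
--         changed_lines: Set of changed line numbers.
--
--     Returns:
--         ``True`` if any changed line falls within the symbol's range.
--     """
--     for line in changed_lines:
--         if start_line <= line <= end_line:
--             return True
--     return False
-- ===== SOURCE B (Python) =====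
-- def _symbol_overlaps_changes(
--     start_line: int,
--     end_line: int,
--     changed_lines: set[int],
-- ) -> bool:
--     """Sort the changed lines; the smallest one >= start_line decides overlap."""
--     for line in sorted(changed_lines):
--         if line >= start_line:
--             return line <= end_line
--     return False
-- ===== Notes on version B (the rewrite author's own statement) =====
-- stated objective: alternative
-- what changed: B sorts the changed lines and decides overlap from the single smallest line >= start_line (first candidate <= end_line or not), instead of A's per-element range test over the unordered set.
import Mathlib
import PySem

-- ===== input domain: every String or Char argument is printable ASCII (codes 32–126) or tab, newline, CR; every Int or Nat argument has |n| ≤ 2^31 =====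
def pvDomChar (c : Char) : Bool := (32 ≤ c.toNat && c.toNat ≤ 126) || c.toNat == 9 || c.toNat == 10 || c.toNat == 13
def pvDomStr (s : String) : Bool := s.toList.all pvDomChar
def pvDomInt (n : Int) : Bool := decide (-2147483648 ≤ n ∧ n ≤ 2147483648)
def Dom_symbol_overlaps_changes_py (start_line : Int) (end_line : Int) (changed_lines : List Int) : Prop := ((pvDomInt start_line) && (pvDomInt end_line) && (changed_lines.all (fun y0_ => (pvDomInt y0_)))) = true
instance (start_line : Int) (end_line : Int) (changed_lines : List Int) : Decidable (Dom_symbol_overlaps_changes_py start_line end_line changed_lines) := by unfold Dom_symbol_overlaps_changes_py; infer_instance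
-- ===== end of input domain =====

-- B sorts the changed lines and decides overlap from the single smallest line ≥ start_line; alternative decomposition, same result.

-- ===== PORT A =====
-- A: for line in changed_lines: if start_line <= line <= end_line: return True; return False
def symbol_overlaps_changes_py (start_line : Int) (end_line : Int) (changed_lines : List Int) : Bool :=
  match changed_lines with
  | [] => false
  | line :: rest =>
    if start_line ≤ line ∧ line ≤ end_line then true
    else symbol_overlaps_changes_py start_line end_line rest

-- ===== PORT B =====
-- B's loop over sorted(changed_lines): first line ≥ start_line decides the answer.
def pvAltLoop (start_line : Int) (end_line : Int) : List Int → Bool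
  | [] => false
  | line :: rest =>
    if start_line ≤ line then decide (line ≤ end_line)
    else pvAltLoop start_line end_line rest

def symbol_overlaps_changes_py_alt (start_line : Int) (end_line : Int) (changed_lines : List Int) : Bool :=
  pvAltLoop start_line end_line (PySem.List.sorted changed_lines (fun x => x) false)

-- ===== PRECONDITION & SPEC =====
def Spec_symbol_overlaps_changes_py (start_line : Int) (end_line : Int) (changed_lines : List Int) (out : Bool) : Prop := out = symbol_overlaps_changes_py_alt start_line end_line changed_lines
instance (start_line : Int) (end_line : Int) (changed_lines : List Int) (out : Bool) : Decidable (Spec_symbol_overlaps_changes_py start_line end_line changed_lines out) := by unfold Spec_symbol_overlaps_changes_py; infer_instance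

-- ===== CLAIM (what is proved, stated in full; the proofs are below) =====
def Claim_equal_symbol_overlaps_changes_py : Prop := ∀ (start_line : Int) (end_line : Int) (changed_lines : List Int), Dom_symbol_overlaps_changes_py start_line end_line changed_lines → Spec_symbol_overlaps_changes_py start_line end_line changed_lines (symbol_overlaps_changes_py start_line end_line changed_lines)

-- ===== LEMMAS AND PROOFS =====

theorem portA_eq_any (s e : Int) (cl : List Int) :
    symbol_overlaps_changes_py s e cl = cl.any (fun l => decide (s ≤ l ∧ l ≤ e)) := by
  induction cl with
  | nil => rfl
  | cons l rest ih =>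
    simp only [symbol_overlaps_changes_py, List.any_cons]
    by_cases h : s ≤ l ∧ l ≤ e <;> simp [h, ih]

theorem altLoop_eq_any (s e : Int) (xs : List Int)
    (hs : xs.Pairwise (· ≤ ·)) :
    pvAltLoop s e xs = xs.any (fun l => decide (s ≤ l ∧ l ≤ e)) := by
  induction xs with
  | nil => rfl
  | cons l rest ih =>
    rcases List.pairwise_cons.mp hs with ⟨hle, hrest⟩
    simp only [pvAltLoop, List.any_cons]
    by_cases h : s ≤ l
    · by_cases h2 : l ≤ e
      · simp [h, h2]
      · -- l > e, l ≤ every element of rest ⇒ no element of rest lies in [s,e]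
        have : rest.any (fun x => decide (s ≤ x ∧ x ≤ e)) = false := by
          simp only [List.any_eq_false]
          intro x hx
          have := hle x hx
          simp only [decide_eq_true_eq, not_and]
          intro _; omega
        simp only [h, if_true]
        rw [this]
        simp [h2]
    · simp [h, ih hrest]

theorem symbol_overlaps_changes_py_spec : Claim_equal_symbol_overlaps_changes_py := by
  intro s e cl _
  show symbol_overlaps_changes_py s e cl = symbol_overlaps_changes_py_alt s e cl
  rw [portA_eq_any, symbol_overlaps_changes_py_alt,
    altLoop_eq_any s e _ (by simpa using PySem.List.sorted_pairwise (xs := cl) (key := fun x => x)),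
    List.any_eq, List.any_eq]
  simp [PySem.List.mem_sorted]
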